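-- pv_equiv track=rewrite | github.com/d55liang/PvZ_AI_Agent | agent/game_loop.py | is_plant_label
-- ===== SOURCE A (Python) =====
-- def normalize_plant_label(raw_label: str) -> str | None:
--     key = raw_label.strip().lower()
--     if "zombie" in key:
--         return None
--     if "cart" in key or "mower" in key:
--         return None
--     if "bullet" in key or "projectile" in key:
--         return None
--
--     if "sunflower" in key:
--         return "sun_flower"
--     if "snow" in key or "ice" in key or "cold" in key:
--         if "pea" in key:
--             return "snow_pea"
--     if "pea" in key:
--         return "pea_shooter"
--     if "wall" in key and "nut" in key:
--         return "wall_nut"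
--     if "wallnut" in key or "walnut" in key:
--         return "wall_nut"
--     return None
--
-- def is_plant_label(raw_label: str) -> bool:
--     if normalize_plant_label(raw_label) is not None:
--         return True
--     key = raw_label.strip().lower()
--     if "zombie" in key or "cart" in key or "mower" in key or "bullet" in key or "projectile" in key:
--         return False
--     return any(
--         k in key
--         for k in ["potato", "mushroom", "flower", "repeater", "chomper", "cabbage", "plant"]
--     )
-- ===== SOURCE B (Python) =====
-- EXCLUDE = ("zombie", "cart", "mower", "bullet", "projectile")
-- KEYWORDS = ("pea", "walnut", "potato", "mushroom", "flower",
--             "repeater", "chomper", "cabbage", "plant")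
--
-- def is_plant_label(raw_label: str) -> bool:
--     key = raw_label.strip().lower()
--     if any(x in key for x in EXCLUDE):
--         return False
--     return any(k in key for k in KEYWORDS) or ("wall" in key and "nut" in key)
-- ===== Notes on version B (the rewrite author's own statement) =====
-- stated objective: simpler
-- what changed: Replaced the two-pass if-cascade (normalize helper returning a plant name, then a second keyword scan) by one flat table-driven check: one exclusion any(), one keyword any() plus the single wall-and-nut conjunction; patterns subsumed by others (sunflower by flower, wallnut by the conjunction, the snow/ice/cold branch by pea) are dropped, so fewer substring scans run per call.
import Mathlib
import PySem

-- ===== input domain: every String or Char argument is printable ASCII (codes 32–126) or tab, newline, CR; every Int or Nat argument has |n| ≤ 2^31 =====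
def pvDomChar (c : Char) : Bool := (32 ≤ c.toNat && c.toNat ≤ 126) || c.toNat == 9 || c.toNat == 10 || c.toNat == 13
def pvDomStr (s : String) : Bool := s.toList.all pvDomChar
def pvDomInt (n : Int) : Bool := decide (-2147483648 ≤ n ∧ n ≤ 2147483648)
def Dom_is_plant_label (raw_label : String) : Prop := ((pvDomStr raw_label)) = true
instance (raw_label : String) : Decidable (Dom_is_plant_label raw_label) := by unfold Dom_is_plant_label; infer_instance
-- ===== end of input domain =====

-- B replaces the two-pass if-cascade (normalize helper + second keyword scan) by one flat
-- table-driven check, dropping patterns subsumed by others; objective: simpler.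

-- ===== PORT A =====
def normalize_plant_label (raw_label : String) : Option String :=
  let key := PySem.Str.lower (PySem.Str.strip raw_label)
  if PySem.Str.isIn "zombie" key then none
  else if PySem.Str.isIn "cart" key || PySem.Str.isIn "mower" key then none
  else if PySem.Str.isIn "bullet" key || PySem.Str.isIn "projectile" key then none
  else if PySem.Str.isIn "sunflower" key then some "sun_flower"
  else if (PySem.Str.isIn "snow" key || PySem.Str.isIn "ice" key || PySem.Str.isIn "cold" key)
          && PySem.Str.isIn "pea" key then some "snow_pea"
  else if PySem.Str.isIn "pea" key then some "pea_shooter"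
  else if PySem.Str.isIn "wall" key && PySem.Str.isIn "nut" key then some "wall_nut"
  else if PySem.Str.isIn "wallnut" key || PySem.Str.isIn "walnut" key then some "wall_nut"
  else none

def is_plant_label (raw_label : String) : Bool :=
  if (normalize_plant_label raw_label).isSome then true
  else
    let key := PySem.Str.lower (PySem.Str.strip raw_label)
    if PySem.Str.isIn "zombie" key || PySem.Str.isIn "cart" key || PySem.Str.isIn "mower" key
       || PySem.Str.isIn "bullet" key || PySem.Str.isIn "projectile" key then false
    else
      ["potato", "mushroom", "flower", "repeater", "chomper", "cabbage", "plant"].any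
        (fun k => PySem.Str.isIn k key)

-- ===== PORT B =====
def is_plant_label_alt (raw_label : String) : Bool :=
  let key := PySem.Str.lower (PySem.Str.strip raw_label)
  if ["zombie", "cart", "mower", "bullet", "projectile"].any (fun x => PySem.Str.isIn x key) then
    false
  else
    ["pea", "walnut", "potato", "mushroom", "flower", "repeater", "chomper", "cabbage",
      "plant"].any (fun k => PySem.Str.isIn k key)
    || (PySem.Str.isIn "wall" key && PySem.Str.isIn "nut" key)

-- ===== PRECONDITION & SPEC =====
def Spec_is_plant_label (raw_label : String) (out : Bool) : Prop := out = is_plant_label_alt raw_label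
instance (raw_label : String) (out : Bool) : Decidable (Spec_is_plant_label raw_label out) := by unfold Spec_is_plant_label; infer_instance

-- ===== CLAIM (what is proved, stated in full; the proofs are below) =====
def Claim_equal_is_plant_label : Prop := ∀ (raw_label : String), Dom_is_plant_label raw_label → Spec_is_plant_label raw_label (is_plant_label raw_label)

-- ===== LEMMAS AND PROOFS =====

-- if t occurs inside s and s occurs in key, then t occurs in key
theorem isIn_of_isIn_of_infix {t s : String} (h : t.toList <:+: s.toList) (key : String)
    (hs : PySem.Str.isIn s key = true) : PySem.Str.isIn t key = true := by
  rw [PySem.Str.isIn_iff_infix] at hs ⊢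
  exact h.trans hs

-- ===== VERDICT (by name: the statement is the Claim_ definition above) =====
set_option maxHeartbeats 1000000 in
theorem is_plant_label_spec : Claim_equal_is_plant_label := by
  intro raw_label _
  unfold Spec_is_plant_label is_plant_label is_plant_label_alt normalize_plant_label
  set key := PySem.Str.lower (PySem.Str.strip raw_label) with hkey
  clear hkey
  have hsf : PySem.Str.isIn "sunflower" key = true → PySem.Str.isIn "flower" key = true :=
    isIn_of_isIn_of_infix (by decide) key
  have hwn1 : PySem.Str.isIn "wallnut" key = true → PySem.Str.isIn "wall" key = true :=
    isIn_of_isIn_of_infix (by decide) key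
  have hwn2 : PySem.Str.isIn "wallnut" key = true → PySem.Str.isIn "nut" key = true :=
    isIn_of_isIn_of_infix (by decide) key
  simp only [List.any_cons, List.any_nil, Bool.or_false]
  split_ifs <;> simp_all
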